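-- pv_equiv track=rewrite | github.com/HPCL/codepurrfect | src/static/passes-other/count-comments/CountComments.py | contains_comment
-- ===== SOURCE A (Python) =====
-- def contains_comment(line, comment_starter_str_l):
--     to_return = (False, 0)
--     for substr in comment_starter_str_l:
--         if substr in line:
--             to_return = (True, line.find(substr))
--         else:
--             continue
--     return to_return
-- ===== SOURCE B (Python) =====
-- def contains_comment(line, comment_starter_str_l):
--     for substr in reversed(comment_starter_str_l):
--         if substr in line:
--             return (True, line.find(substr))
--     return (False, 0)
-- ===== Notes on version B (the rewrite author's own statement) =====
-- stated objective: simpler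
-- what changed: Scans the starter list in reverse and returns at the first substring found in the line (early exit), instead of scanning the whole list forwards and overwriting the result on every hit.
import Mathlib
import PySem

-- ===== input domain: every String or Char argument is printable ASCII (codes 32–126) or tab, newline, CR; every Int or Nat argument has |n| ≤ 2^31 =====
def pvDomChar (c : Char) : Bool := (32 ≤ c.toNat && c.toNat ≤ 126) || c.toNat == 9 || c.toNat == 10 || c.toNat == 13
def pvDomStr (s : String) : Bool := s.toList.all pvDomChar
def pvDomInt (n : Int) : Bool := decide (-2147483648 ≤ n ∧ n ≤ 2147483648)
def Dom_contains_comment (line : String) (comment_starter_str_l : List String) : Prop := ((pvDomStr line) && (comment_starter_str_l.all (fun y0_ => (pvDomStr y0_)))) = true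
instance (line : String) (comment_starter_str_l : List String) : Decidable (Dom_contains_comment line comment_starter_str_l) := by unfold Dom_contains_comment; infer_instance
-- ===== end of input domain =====

-- B scans the starter list in reverse and returns at the first hit (early exit) instead of scanning
-- the whole list forwards and overwriting the result on each hit; same return value, simpler control flow.

-- ===== PORT A =====
def contains_comment (line : String) (comment_starter_str_l : List String) : Bool × Int :=
  comment_starter_str_l.foldl
    (fun to_return substr =>
      if PySem.Str.isIn substr line then (true, PySem.Str.find line substr) else to_return)
    (false, 0)

-- ===== PORT B =====
def ccAltGo (line : String) : List String → Bool × Int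
  | [] => (false, 0)
  | substr :: rest =>
      if PySem.Str.isIn substr line then (true, PySem.Str.find line substr)
      else ccAltGo line rest

def contains_comment_alt (line : String) (comment_starter_str_l : List String) : Bool × Int :=
  ccAltGo line comment_starter_str_l.reverse

-- ===== PRECONDITION & SPEC =====
def Spec_contains_comment (line : String) (comment_starter_str_l : List String) (out : Bool × Int) : Prop := out = contains_comment_alt line comment_starter_str_l
instance (line : String) (comment_starter_str_l : List String) (out : Bool × Int) : Decidable (Spec_contains_comment line comment_starter_str_l out) := by unfold Spec_contains_comment; infer_instance

-- ===== CLAIM (what is proved, stated in full; the proofs are below) =====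
def Claim_equal_contains_comment : Prop := ∀ (line : String) (comment_starter_str_l : List String), Dom_contains_comment line comment_starter_str_l → Spec_contains_comment line comment_starter_str_l (contains_comment line comment_starter_str_l)

-- ===== LEMMAS AND PROOFS =====

-- first hit scanning from the front, as an Option
def ccGoOpt (line : String) : List String → Option (Bool × Int)
  | [] => none
  | substr :: rest =>
      if PySem.Str.isIn substr line then some (true, PySem.Str.find line substr)
      else ccGoOpt line rest

theorem ccAltGo_eq_opt (line : String) (l : List String) :
    ccAltGo line l = (ccGoOpt line l).getD (false, 0) := by
  induction l with
  | nil => rfl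
  | cons s t ih =>
      simp only [ccAltGo, ccGoOpt]
      split <;> simp [ih]

theorem ccGoOpt_append (line : String) (xs ys : List String) :
    ccGoOpt line (xs ++ ys) = (ccGoOpt line xs).orElse (fun _ => ccGoOpt line ys) := by
  induction xs with
  | nil => rfl
  | cons s t ih =>
      simp only [List.cons_append, ccGoOpt]
      split <;> simp [ih]

theorem foldl_eq_opt (line : String) (l : List String) (acc : Bool × Int) :
    l.foldl
      (fun to_return substr =>
        if PySem.Str.isIn substr line then (true, PySem.Str.find line substr) else to_return)
      acc = (ccGoOpt line l.reverse).getD acc := by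
  induction l generalizing acc with
  | nil => rfl
  | cons s t ih =>
      simp only [List.foldl_cons, List.reverse_cons, ccGoOpt_append, ih]
      cases h : ccGoOpt line t.reverse with
      | some v => simp [Option.orElse]
      | none =>
          simp only [Option.orElse]
          simp only [ccGoOpt, PySem.Str.isIn, PySem.Str.find]
          split <;> simp

-- ===== VERDICT (by name: the statement is the Claim_ definition above) =====
theorem contains_comment_spec : Claim_equal_contains_comment := by
  intro line l _
  show contains_comment line l = contains_comment_alt line l
  rw [contains_comment, contains_comment_alt, foldl_eq_opt, ccAltGo_eq_opt]
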